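-- pv_equiv track=rewrite | github.com/1hoookkk/fieldEngineBundle | tools/extraction/generate_zplane_presets.py | assign_samples_to_preset
-- ===== SOURCE A (Python) =====
-- from typing import List, Dict
--
-- def assign_samples_to_preset(samples: List[str], preset_template: Dict) -> List[str]:
--     """Intelligently assign samples to preset based on category"""
--     if not samples:
--         return []
--
--     category = preset_template.get('category', 'Lead')
--     sample_count = min(4, len(samples))  # Limit to 4 samples per preset
--
--     # Sort samples by ID to get consistent assignment
--     sorted_samples = sorted(samples)
--
--     if category == 'Bass':
--         # Use lower-numbered samples for bass (typically lower pitch)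
--         return sorted_samples[:sample_count]
--     elif category == 'Lead':
--         # Use mid-range samples for leads
--         start_idx = len(sorted_samples) // 4
--         return sorted_samples[start_idx:start_idx + sample_count]
--     elif category == 'Pad':
--         # Use higher-numbered samples for pads (typically more complex)
--         start_idx = len(sorted_samples) // 2
--         return sorted_samples[start_idx:start_idx + sample_count]
--     elif category == 'Pluck':
--         # Use bright samples for plucks
--         start_idx = len(sorted_samples) * 3 // 4
--         return sorted_samples[start_idx:start_idx + sample_count]
--     else:  # FX
--         # Use varied samples for FX
--         step = max(1, len(sorted_samples) // sample_count)
--         return [sorted_samples[i * step] for i in range(sample_count)]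
-- ===== SOURCE B (Python) =====
-- from typing import List, Dict
--
--
-- def _select(xs: List[str], p: int) -> str:
--     """p-th smallest element of xs (0-based), by three-way-partition quickselect."""
--     while True:
--         pivot = xs[len(xs) // 2]
--         lt = [x for x in xs if x < pivot]
--         if p < len(lt):
--             xs = lt
--             continue
--         eq = sum(1 for x in xs if x == pivot)
--         if p < len(lt) + eq:
--             return pivot
--         p -= len(lt) + eq
--         xs = [x for x in xs if pivot < x]
--
--
-- def assign_samples_to_preset(samples: List[str], preset_template: Dict) -> List[str]:
--     """Same assignment as the original, but without sorting: pick only the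
--     needed sorted positions via quickselect."""
--     if not samples:
--         return []
--     n = len(samples)
--     k = min(4, n)
--     category = preset_template.get('category', 'Lead')
--     if category == 'Bass':
--         positions = list(range(0, min(k, n)))
--     elif category == 'Lead':
--         s = n // 4
--         positions = list(range(s, min(s + k, n)))
--     elif category == 'Pad':
--         s = n // 2
--         positions = list(range(s, min(s + k, n)))
--     elif category == 'Pluck':
--         s = n * 3 // 4
--         positions = list(range(s, min(s + k, n)))
--     else:  # FX
--         step = max(1, n // k)
--         positions = [i * step for i in range(k)]
--     return [_select(samples, p) for p in positions]
-- ===== Notes on version B (the rewrite author's own statement) =====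
-- stated objective: alternative
-- what changed: B never sorts: it computes the ≤4 needed rank positions per category and extracts each order statistic with a three-way-partition quickselect.
import Mathlib
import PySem

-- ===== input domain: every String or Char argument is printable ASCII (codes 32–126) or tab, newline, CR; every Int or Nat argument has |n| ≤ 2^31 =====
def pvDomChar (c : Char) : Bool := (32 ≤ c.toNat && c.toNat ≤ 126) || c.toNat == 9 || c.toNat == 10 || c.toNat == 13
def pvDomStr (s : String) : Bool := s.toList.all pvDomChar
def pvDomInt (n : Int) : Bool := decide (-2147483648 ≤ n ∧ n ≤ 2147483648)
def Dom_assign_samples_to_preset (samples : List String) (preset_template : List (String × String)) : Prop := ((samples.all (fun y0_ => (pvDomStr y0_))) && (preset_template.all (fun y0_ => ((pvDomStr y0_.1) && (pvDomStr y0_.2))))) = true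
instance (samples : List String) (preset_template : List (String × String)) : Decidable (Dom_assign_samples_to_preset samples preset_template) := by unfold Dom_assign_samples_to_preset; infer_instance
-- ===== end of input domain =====

-- B replaces A's full sort + slice by quickselect extraction of the ≤4 needed order
-- statistics (objective: alternative algorithm of similar cost).

-- ===== PORT A =====
-- Literal port of A: sort everything, then slice (or a strided comprehension for FX).
-- The FX indexing sorted_samples[i*step] is always in range (proved below), so the
-- total pyGetD form is exact; A is total.
def assign_samples_to_preset (samples : List String) (preset_template : List (String × String)) : List String :=
  if samples = [] then []
  else
    let category := (PySem.Dict.mk preset_template).getD "category" "Lead"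
    let sample_count : Int := min 4 (PySem.List.len samples)
    let sorted_samples := PySem.List.sorted samples (fun x => x) false
    if category = "Bass" then
      PySem.List.slice sorted_samples none (some sample_count)
    else if category = "Lead" then
      let start_idx := PySem.Int.floordiv (PySem.List.len sorted_samples) 4
      PySem.List.slice sorted_samples (some start_idx) (some (start_idx + sample_count))
    else if category = "Pad" then
      let start_idx := PySem.Int.floordiv (PySem.List.len sorted_samples) 2
      PySem.List.slice sorted_samples (some start_idx) (some (start_idx + sample_count))
    else if category = "Pluck" then
      let start_idx := PySem.Int.floordiv (PySem.List.len sorted_samples * 3) 4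
      PySem.List.slice sorted_samples (some start_idx) (some (start_idx + sample_count))
    else
      let step := max 1 (PySem.Int.floordiv (PySem.List.len sorted_samples) sample_count)
      (PySem.List.pyRange 0 sample_count).map (fun i => PySem.List.pyGetD sorted_samples (i * step) "")

-- ===== PORT B =====
-- Port of Source B's _select (three-way-partition quickselect). The fuel argument is
-- len(xs) at the call site and only makes the while-loop's recursion structural;
-- callers keep p < len xs, so the [] branch (where Python would raise) is unreachable.
-- Indices and counts are nonnegative in Source B, so they are carried as Nat.
def pvSelectGo : Nat → List String → Nat → String
  | 0, _, _ => ""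
  | fuel + 1, xs, p =>
    if xs = [] then ""
    else
      let pivot := xs.getD (xs.length / 2) ""
      if p < (xs.filter (fun x => decide (x < pivot))).length then
        pvSelectGo fuel (xs.filter (fun x => decide (x < pivot))) p
      else if p < (xs.filter (fun x => decide (x < pivot))).length + xs.countP (fun x => decide (x = pivot)) then
        pivot
      else
        pvSelectGo fuel (xs.filter (fun x => decide (pivot < x)))
          (p - ((xs.filter (fun x => decide (x < pivot))).length + xs.countP (fun x => decide (x = pivot))))

def pvSelect (xs : List String) (p : Nat) : String := pvSelectGo xs.length xs p

-- Port of Source B's assign_samples_to_preset: compute the rank positions per category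
-- (list(range(s, e)) is List.range' s (e - s)), then quickselect each one.
def assign_samples_to_preset_alt (samples : List String) (preset_template : List (String × String)) : List String :=
  if samples = [] then []
  else
    let n := samples.length
    let k := min 4 n
    let category := (PySem.Dict.mk preset_template).getD "category" "Lead"
    let positions : List Nat :=
      if category = "Bass" then List.range' 0 (min k n)
      else if category = "Lead" then List.range' (n / 4) (min (n / 4 + k) n - n / 4)
      else if category = "Pad" then List.range' (n / 2) (min (n / 2 + k) n - n / 2)
      else if category = "Pluck" then List.range' (n * 3 / 4) (min (n * 3 / 4 + k) n - n * 3 / 4)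
      else (List.range k).map (fun i => i * max 1 (n / k))
    positions.map (fun p => pvSelect samples p)

-- ===== PRECONDITION & SPEC =====
def Spec_assign_samples_to_preset (samples : List String) (preset_template : List (String × String)) (out : List String) : Prop := out = assign_samples_to_preset_alt samples preset_template
instance (samples : List String) (preset_template : List (String × String)) (out : List String) : Decidable (Spec_assign_samples_to_preset samples preset_template out) := by unfold Spec_assign_samples_to_preset; infer_instance

-- ===== CLAIM (what is proved, stated in full; the proofs are below) =====
def Claim_equal_assign_samples_to_preset : Prop := ∀ (samples : List String) (preset_template : List (String × String)), Dom_assign_samples_to_preset samples preset_template → Spec_assign_samples_to_preset samples preset_template (assign_samples_to_preset samples preset_template)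

-- ===== LEMMAS AND PROOFS =====

-- The two residual filters of the second partition pass are the "= pivot" and "> pivot" filters.
lemma pv_filter_eq_piv (xs : List String) (piv : String) :
    (xs.filter (fun x => !decide (x < piv))).filter (fun x => decide (x = piv))
      = xs.filter (fun x => decide (x = piv)) := by
  rw [List.filter_filter]
  apply List.filter_congr
  intro x _
  by_cases h : x = piv
  · subst h; simp
  · simp [h]

lemma pv_filter_gt_piv (xs : List String) (piv : String) :
    (xs.filter (fun x => !decide (x < piv))).filter (fun x => !decide (x = piv))
      = xs.filter (fun x => decide (piv < x)) := by
  rw [List.filter_filter]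
  apply List.filter_congr
  intro x _
  rcases lt_trichotomy x piv with h | h | h
  · simp [h, lt_asymm h, h.ne]
  · subst h; simp
  · simp [h, lt_asymm h, h.ne']

-- Three-way partition is a permutation of the list.
lemma pv_partition_perm (xs : List String) (piv : String) :
    (xs.filter (fun x => decide (x < piv)) ++
      (xs.filter (fun x => decide (x = piv)) ++ xs.filter (fun x => decide (piv < x)))).Perm xs := by
  have h1 := List.filter_append_perm (fun x => decide (x < piv)) xs
  have h2 := List.filter_append_perm (fun x => decide (x = piv))
    (xs.filter (fun x => !decide (x < piv)))
  rw [pv_filter_eq_piv, pv_filter_gt_piv] at h2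
  exact ((List.Perm.refl _).append h2).trans h1

-- sorted(xs) splits into sorted(<pivot) ++ (=pivot) ++ sorted(>pivot).
lemma pv_sorted_decomp (xs : List String) (piv : String) :
    PySem.List.sorted xs (fun x => x) false =
      PySem.List.sorted (xs.filter (fun x => decide (x < piv))) (fun x => x) false ++
        (xs.filter (fun x => decide (x = piv)) ++
          PySem.List.sorted (xs.filter (fun x => decide (piv < x))) (fun x => x) false) := by
  apply PySem.List.sorted_id_eq_of_perm_of_pairwise
  · refine List.Perm.trans ?_ (pv_partition_perm xs piv)
    exact (PySem.List.sorted_perm _ _ _).append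
      ((List.Perm.refl _).append (PySem.List.sorted_perm _ _ _))
  · rw [List.pairwise_append]
    refine ⟨PySem.List.sorted_pairwise _ _, ?_, ?_⟩
    · rw [List.pairwise_append]
      refine ⟨?_, PySem.List.sorted_pairwise _ _, ?_⟩
      · exact List.pairwise_of_forall_mem_list (fun a ha b hb => by
          have ha' := (List.mem_filter.mp ha).2
          have hb' := (List.mem_filter.mp hb).2
          simp only [decide_eq_true_eq] at ha' hb'
          rw [ha', hb'])
      · intro a ha b hb
        have ha' := (List.mem_filter.mp ha).2
        have hb' := (List.mem_filter.mp ((PySem.List.mem_sorted _ _ _ _).mp hb)).2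
        simp only [decide_eq_true_eq] at ha' hb'
        rw [ha']; exact le_of_lt hb'
    · intro a ha b hb
      have ha' := (List.mem_filter.mp ((PySem.List.mem_sorted _ _ _ _).mp ha)).2
      simp only [decide_eq_true_eq] at ha'
      rcases List.mem_append.mp hb with hb | hb
      · have hb' := (List.mem_filter.mp hb).2
        simp only [decide_eq_true_eq] at hb'
        rw [hb']; exact le_of_lt ha'
      · have hb' := (List.mem_filter.mp ((PySem.List.mem_sorted _ _ _ _).mp hb)).2
        simp only [decide_eq_true_eq] at hb'
        exact le_of_lt (lt_trans ha' hb')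

-- Quickselect returns the p-th element of the sorted list.
lemma pvSelectGo_eq : ∀ (f : Nat) (xs : List String) (p : Nat), xs.length ≤ f → p < xs.length →
    pvSelectGo f xs p = (PySem.List.sorted xs (fun x => x) false).getD p "" := by
  intro f
  induction f with
  | zero => intro xs p hf hp; omega
  | succ f ih =>
    intro xs p hf hp
    have hxs : xs ≠ [] := by intro h; subst h; simp at hp
    have hlp : xs.length / 2 < xs.length := Nat.div_lt_self (by omega) one_lt_two
    simp only [pvSelectGo, if_neg hxs]
    set piv := xs.getD (xs.length / 2) "" with hpivdef
    have hpivmem : piv ∈ xs := by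
      rw [hpivdef, List.getD_eq_getElem _ _ hlp]; exact List.getElem_mem _
    set L := xs.filter (fun x => decide (x < piv)) with hLdef
    set M := xs.filter (fun x => decide (x = piv)) with hMdef
    set G := xs.filter (fun x => decide (piv < x)) with hGdef
    have hLlen : L.length < xs.length :=
      List.length_filter_lt_length_iff_exists.mpr ⟨piv, hpivmem, by simp⟩
    have hGlen : G.length < xs.length :=
      List.length_filter_lt_length_iff_exists.mpr ⟨piv, hpivmem, by simp⟩
    have hsum : L.length + M.length + G.length = xs.length := by
      have h := (pv_partition_perm xs piv).length_eq
      simp only [List.length_append] at h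
      rw [hLdef, hMdef, hGdef]
      omega
    have hcount : xs.countP (fun x => decide (x = piv)) = M.length := by
      rw [hMdef]; exact List.countP_eq_length_filter
    have hSL : (PySem.List.sorted L (fun x => x) false).length = L.length :=
      PySem.List.length_sorted _ _ _
    have hdecomp := pv_sorted_decomp xs piv
    rw [← hLdef, ← hMdef, ← hGdef] at hdecomp
    rw [hcount]
    split_ifs with h1 h2
    · rw [ih L p (by omega) h1, hdecomp, List.getD_append _ _ _ p (by omega)]
    · rw [hdecomp, List.getD_append_right _ _ _ p (by omega),
        List.getD_append _ _ _ _ (by omega)]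
      have hidx : p - (PySem.List.sorted L (fun x => x) false).length < M.length := by omega
      rw [List.getD_eq_getElem _ _ hidx]
      have := (List.mem_filter.mp (List.getElem_mem hidx)).2
      simp only [decide_eq_true_eq] at this
      exact this.symm
    · rw [ih G (p - (L.length + M.length)) (by omega) (by omega), hdecomp,
        List.getD_append_right _ _ _ p (by omega),
        List.getD_append_right _ _ _ _ (by omega)]
      congr 1
      omega

-- A slice of a list, as the map of getD over the corresponding index range.
lemma pv_take_drop_map (l : List String) : ∀ (m s : Nat), s + m ≤ l.length →
    (l.drop s).take m = (List.range' s m).map (fun i => l.getD i "") := by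
  intro m
  induction m with
  | zero => intro s _; simp
  | succ m ih =>
    intro s h
    have hs : s < l.length := by omega
    rw [List.range'_succ, List.drop_eq_getElem_cons hs]
    simp only [List.take_succ_cons, List.map_cons]
    rw [ih (s + 1) (by omega), List.getD_eq_getElem _ _ hs]

-- Contiguous branch: sorted-slice [s : s+k] equals quickselect over range' s m.
lemma pv_branch (samples : List String) (s m : Nat)
    (hs : s ≤ samples.length)
    (hm : m = min (s + min 4 samples.length) samples.length - s) :
    ((PySem.List.sorted samples (fun x => x) false).drop s).take (min 4 samples.length)
      = (List.range' s m).map (fun p => pvSelect samples p) := by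
  set S := PySem.List.sorted samples (fun x => x) false with hSdef
  have hlenS : S.length = samples.length := PySem.List.length_sorted _ _ _
  set k := min 4 samples.length with hkdef
  have htk : (S.drop s).take k = (S.drop s).take m := by
    by_cases h : k ≤ samples.length - s
    · congr 1; omega
    · rw [List.take_of_length_le (by simp [hlenS]; omega),
        List.take_of_length_le (by simp [hlenS]; omega)]
  rw [htk, pv_take_drop_map S m s (by omega)]
  apply List.map_congr_left
  intro p hp
  have hp' : p < samples.length := by
    have := List.mem_range'_1.mp hp
    omega
  rw [pvSelect, pvSelectGo_eq samples.length samples p le_rfl hp']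

-- ===== VERDICT (by name: the statement is the Claim_ definition above) =====
theorem assign_samples_to_preset_spec : Claim_equal_assign_samples_to_preset := by
  intro samples preset_template _hdom
  unfold Spec_assign_samples_to_preset
  by_cases hnil : samples = []
  · subst hnil
    simp [assign_samples_to_preset, assign_samples_to_preset_alt]
  · simp only [assign_samples_to_preset, assign_samples_to_preset_alt, if_neg hnil,
      PySem.List.len_eq, PySem.List.length_sorted]
    set c := (PySem.Dict.mk preset_template).getD "category" "Lead" with hc
    set n := samples.length with hn
    have hnpos : 0 < n := by
      rw [hn]; exact List.length_pos_iff.mpr hnil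
    set S := PySem.List.sorted samples (fun x => x) false with hSdef
    have hlenS : S.length = n := PySem.List.length_sorted _ _ _
    have hkI : (min 4 (n : Int)) = ((min 4 n : Nat) : Int) := by omega
    set k := min 4 n with hkdef
    have hk1 : 1 ≤ k := by omega
    have hkn : k ≤ n := by omega
    by_cases hb : c = "Bass"
    · simp only [if_pos hb]
      rw [hkI, PySem.List.slice_to S (by omega)]
      have h0 : ((k : Int)).toNat = k := by omega
      rw [h0]
      have := pv_branch samples 0 (min k n) (by omega) (by omega)
      simpa [hSdef, hn, hkdef] using this
    · simp only [if_neg hb]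
      by_cases hl : c = "Lead"
      · simp only [if_pos hl]
        have hfd : PySem.Int.floordiv (n : Int) 4 = ((n / 4 : Nat) : Int) := by
          rw [PySem.Int.floordiv_eq_ediv_of_pos (by norm_num)]; omega
        rw [hfd, hkI, PySem.List.slice_toNat S (by omega) (by omega)]
        have h1 : (((n / 4 : Nat) : Int) + (k : Int)).toNat - (((n / 4 : Nat) : Int)).toNat = k := by omega
        have h2 : (((n / 4 : Nat) : Int)).toNat = n / 4 := by omega
        rw [h1, h2]
        have := pv_branch samples (n / 4) (min (n / 4 + k) n - n / 4)
          (by omega) (by rw [← hn, ← hkdef])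
        simpa [hSdef, hn, hkdef] using this
      · simp only [if_neg hl]
        by_cases hp : c = "Pad"
        · simp only [if_pos hp]
          have hfd : PySem.Int.floordiv (n : Int) 2 = ((n / 2 : Nat) : Int) := by
            rw [PySem.Int.floordiv_eq_ediv_of_pos (by norm_num)]; omega
          rw [hfd, hkI, PySem.List.slice_toNat S (by omega) (by omega)]
          have h1 : (((n / 2 : Nat) : Int) + (k : Int)).toNat - (((n / 2 : Nat) : Int)).toNat = k := by omega
          have h2 : (((n / 2 : Nat) : Int)).toNat = n / 2 := by omega
          rw [h1, h2]
          have := pv_branch samples (n / 2) (min (n / 2 + k) n - n / 2)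
            (by omega) (by rw [← hn, ← hkdef])
          simpa [hSdef, hn, hkdef] using this
        · simp only [if_neg hp]
          by_cases hq : c = "Pluck"
          · simp only [if_pos hq]
            have hfd : PySem.Int.floordiv ((n : Int) * 3) 4 = ((n * 3 / 4 : Nat) : Int) := by
              rw [PySem.Int.floordiv_eq_ediv_of_pos (by norm_num)]
              push_cast
              omega
            rw [hfd, hkI, PySem.List.slice_toNat S (by omega) (by omega)]
            have h1 : (((n * 3 / 4 : Nat) : Int) + (k : Int)).toNat - (((n * 3 / 4 : Nat) : Int)).toNat = k := by omega
            have h2 : (((n * 3 / 4 : Nat) : Int)).toNat = n * 3 / 4 := by omega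
            rw [h1, h2]
            have := pv_branch samples (n * 3 / 4) (min (n * 3 / 4 + k) n - n * 3 / 4)
              (by omega) (by rw [← hn, ← hkdef])
            simpa [hSdef, hn, hkdef] using this
          · simp only [if_neg hq]
            -- FX branch
            set st := n / k with hstdef
            have hst1 : 1 ≤ st := by
              rw [hstdef]; exact (Nat.one_le_div_iff (by omega)).mpr hkn
            rw [hkI]
            have hstep : max 1 (PySem.Int.floordiv (n : Int) ((k : Nat) : Int)) = ((st : Nat) : Int) := by
              rw [PySem.Int.floordiv_eq_ediv_of_pos (by omega), ← Int.natCast_ediv, ← hstdef]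
              omega
            have hmaxst : max 1 st = st := by omega
            rw [hstep, hmaxst, PySem.List.pyRange_zero_natCast k, List.map_map, List.map_map]
            apply List.map_congr_left
            intro i hi
            have hik : i < k := List.mem_range.mp hi
            have hin : i * st < n := by
              have h1 : (i + 1) * st ≤ k * st := Nat.mul_le_mul_right st (by omega)
              have h2 : st * k ≤ n := by rw [hstdef]; exact Nat.div_mul_le_self n k
              have h3 : k * st = st * k := Nat.mul_comm k st
              have h4 : (i + 1) * st = i * st + st := by ring
              omega
            simp only [Function.comp_apply]
            have hcast : ((i : Int)) * ((st : Nat) : Int) = ((i * st : Nat) : Int) := by push_cast; ring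
            rw [hcast, PySem.List.pyGetD_natCast]
            rw [pvSelect, pvSelectGo_eq samples.length samples (i * st) le_rfl (by omega)]
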